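-- pv_equiv track=rewrite | github.com/yevheniikhudan/leetcode | python/minimum_one_bit_operations.py | minimumOneBitOperations
-- ===== SOURCE A (Python) =====
-- def minimumOneBitOperations(n: int) -> int:
--     ans = 0
--     k = 0
--     mask = 1
--
--     while mask <= n:
--         if n & mask:
--             ans = 2 ** (k + 1) - 1 - ans
--
--         mask <<= 1
--         k += 1
--
--     return ans
-- ===== SOURCE B (Python) =====
-- def minimumOneBitOperations(n: int) -> int:
--     res = 0
--     while n > 0:
--         res ^= n
--         n >>= 1
--     return res
-- ===== Notes on version B (the rewrite author's own statement) =====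
-- stated objective: idiomatic
-- what changed: Replaces the per-set-bit reflection update ans = 2^(k+1)-1-ans against a growing mask with the standard inverse-Gray-code XOR fold: res accumulates n ^ (n>>1) ^ (n>>2) ^ ... while n is shifted right to zero.
import Mathlib
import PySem

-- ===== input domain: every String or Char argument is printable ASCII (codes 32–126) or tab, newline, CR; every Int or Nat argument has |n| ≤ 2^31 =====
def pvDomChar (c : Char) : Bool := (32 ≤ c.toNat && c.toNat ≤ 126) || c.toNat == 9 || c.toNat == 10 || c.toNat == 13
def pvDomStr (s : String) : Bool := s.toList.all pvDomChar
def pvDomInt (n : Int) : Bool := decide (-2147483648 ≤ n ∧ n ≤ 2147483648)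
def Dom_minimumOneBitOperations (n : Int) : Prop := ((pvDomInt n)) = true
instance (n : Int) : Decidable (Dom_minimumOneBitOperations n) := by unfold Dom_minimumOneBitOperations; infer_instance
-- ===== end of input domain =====

-- B replaces A's per-set-bit reflection update (ans = 2^(k+1)-1-ans under a growing mask)
-- with the standard inverse-Gray-code XOR fold (res ^= n; n >>= 1); same value, proved equal.


-- ===== PORT A =====
-- A's while loop; the extra argument hm records that mask stays positive (it starts at 1 and
-- doubles), which is exactly what makes the Python loop terminate.
def pvALoop (n ans : Int) (k : Nat) (mask : Int) (hm : 0 < mask) : Int :=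
  if h : mask ≤ n then
    pvALoop n (if PySem.Int.band n mask ≠ 0 then 2 ^ (k + 1) - 1 - ans else ans)
      (k + 1) (mask <<< (1 : Nat))
      (by rw [Int.shiftLeft_eq]; positivity)
  else ans
  termination_by (n + 1 - mask).toNat
  decreasing_by
    rw [Int.shiftLeft_eq]
    have h2 : (2 : Int) ^ (1 : Nat) = 2 := by norm_num
    rw [h2]
    omega

def minimumOneBitOperations (n : Int) : Int :=
  pvALoop n 0 0 1 (by norm_num)

-- ===== PORT B =====
def pvBLoop (n res : Int) : Int :=
  if h : 0 < n then
    pvBLoop (n >>> (1 : Nat)) (PySem.Int.bxor res n)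
  else res
  termination_by n.toNat
  decreasing_by
    obtain ⟨m, rfl⟩ : ∃ m : Nat, n = (m : Int) := ⟨n.toNat, (Int.toNat_of_nonneg h.le).symm⟩
    have hm : 0 < m := by exact_mod_cast h
    have hs : ((m : Int) >>> (1 : Nat)) = ((m >>> 1 : Nat) : Int) :=
      (Int.natCast_shiftRight m 1).symm
    rw [hs]
    have : m >>> 1 = m / 2 := by simp [Nat.shiftRight_eq_div_pow]
    simp only [this, Int.toNat_natCast]
    omega

def minimumOneBitOperations_alt (n : Int) : Int :=
  pvBLoop n 0

-- ===== PRECONDITION & SPEC =====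
def Spec_minimumOneBitOperations (n : Int) (out : Int) : Prop := out = minimumOneBitOperations_alt n
instance (n : Int) (out : Int) : Decidable (Spec_minimumOneBitOperations n out) := by unfold Spec_minimumOneBitOperations; infer_instance

-- ===== CLAIM (what is proved, stated in full; the proofs are below) =====
def Claim_equal_minimumOneBitOperations : Prop := ∀ (n : Int), Dom_minimumOneBitOperations n → Spec_minimumOneBitOperations n (minimumOneBitOperations n)

-- ===== LEMMAS AND PROOFS =====

-- inverse Gray code on Nat: natB m = m ^^^ natB (m / 2)
def natB (m : Nat) : Nat :=
  if h : m = 0 then 0 else m ^^^ natB (m / 2)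
  termination_by m
  decreasing_by exact Nat.div_lt_self (Nat.pos_of_ne_zero h) one_lt_two

theorem natB_zero : natB 0 = 0 := by rw [natB]; simp

theorem natB_eq (m : Nat) : natB m = m ^^^ natB (m / 2) := by
  by_cases h : m = 0
  · subst h; simp [natB_zero]
  · rw [natB]; simp [h]

theorem xor_div_two (a b : Nat) : (a ^^^ b) / 2 = a / 2 ^^^ b / 2 := by
  have h : (a ^^^ b) >>> 1 = a >>> 1 ^^^ b >>> 1 := Nat.shiftRight_xor_distrib
  simpa [Nat.shiftRight_eq_div_pow] using h

theorem xor_shuffle (x y z : Nat) : x ^^^ (y ^^^ z) = (x ^^^ z) ^^^ y := by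
  rw [Nat.xor_comm y z, ← Nat.xor_assoc]

theorem xor_right_comm (a b c : Nat) : (a ^^^ b) ^^^ c = (a ^^^ c) ^^^ b := by
  rw [Nat.xor_assoc, Nat.xor_comm b c, ← Nat.xor_assoc]

theorem natB_lt (j : Nat) : ∀ m, m < 2 ^ j → natB m < 2 ^ j := by
  induction j with
  | zero =>
    intro m h
    have hm : m = 0 := by omega
    subst hm; simp [natB_zero]
  | succ j ih =>
    intro m h
    have hps : 2 ^ (j + 1) = 2 * 2 ^ j := by rw [Nat.pow_succ]; ring
    have h2 : m / 2 < 2 ^ j := by omega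
    have hb := ih _ h2
    rw [natB_eq]
    exact Nat.xor_lt_two_pow h (by omega)

-- xor with an all-ones mask is subtraction from it
theorem xor_ones (j : Nat) : ∀ a, a < 2 ^ j → a ^^^ (2 ^ j - 1) = 2 ^ j - 1 - a := by
  induction j with
  | zero =>
    intro a h
    have ha : a = 0 := Nat.lt_one_iff.mp (by simpa using h)
    subst ha
    decide
  | succ j ih =>
    intro a h
    have hps : 2 ^ (j + 1) = 2 * 2 ^ j := by rw [Nat.pow_succ]; ring
    have hp : (0 : Nat) < 2 ^ j := Nat.two_pow_pos j
    have hd0 : (a ^^^ (2 ^ (j + 1) - 1)) / 2 = a / 2 ^^^ (2 ^ (j + 1) - 1) / 2 := xor_div_two _ _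
    have e2 : (2 ^ (j + 1) - 1) / 2 = 2 ^ j - 1 := by omega
    rw [e2] at hd0
    have hd2 : a / 2 < 2 ^ j := by omega
    rw [ih _ hd2] at hd0
    have hm : (a ^^^ (2 ^ (j + 1) - 1)) % 2 = (a + (2 ^ (j + 1) - 1)) % 2 := Nat.xor_mod_two_eq
    have hdm := Nat.div_add_mod (a ^^^ (2 ^ (j + 1) - 1)) 2
    omega

-- adding the next power of two, then xoring with its mask, is xor with the doubled mask
theorem add_pow_xor (j : Nat) : ∀ m, m < 2 ^ j → (m + 2 ^ j) ^^^ (2 ^ j - 1) = m ^^^ (2 ^ (j + 1) - 1) := by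
  induction j with
  | zero =>
    intro m h
    have hm : m = 0 := Nat.lt_one_iff.mp (by simpa using h)
    subst hm
    decide
  | succ j ih =>
    intro m h
    have hps : 2 ^ (j + 1) = 2 * 2 ^ j := by rw [Nat.pow_succ]; ring
    have hps2 : 2 ^ (j + 1 + 1) = 2 * 2 ^ (j + 1) := by rw [Nat.pow_succ]; ring
    have hp : (0 : Nat) < 2 ^ j := Nat.two_pow_pos j
    have hu0 : ((m + 2 ^ (j + 1)) ^^^ (2 ^ (j + 1) - 1)) / 2
        = (m + 2 ^ (j + 1)) / 2 ^^^ (2 ^ (j + 1) - 1) / 2 := xor_div_two _ _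
    have e1 : (m + 2 ^ (j + 1)) / 2 = m / 2 + 2 ^ j := by omega
    have e2 : (2 ^ (j + 1) - 1) / 2 = 2 ^ j - 1 := by omega
    rw [e1, e2, ih _ (by omega)] at hu0
    have hw0 : (m ^^^ (2 ^ (j + 1 + 1) - 1)) / 2 = m / 2 ^^^ (2 ^ (j + 1 + 1) - 1) / 2 := xor_div_two _ _
    have e3 : (2 ^ (j + 1 + 1) - 1) / 2 = 2 ^ (j + 1) - 1 := by omega
    rw [e3] at hw0
    have hmu : ((m + 2 ^ (j + 1)) ^^^ (2 ^ (j + 1) - 1)) % 2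
        = (m + 2 ^ (j + 1) + (2 ^ (j + 1) - 1)) % 2 := Nat.xor_mod_two_eq
    have hmw : (m ^^^ (2 ^ (j + 1 + 1) - 1)) % 2 = (m + (2 ^ (j + 1 + 1) - 1)) % 2 := Nat.xor_mod_two_eq
    have d1 := Nat.div_add_mod ((m + 2 ^ (j + 1)) ^^^ (2 ^ (j + 1) - 1)) 2
    have d2 := Nat.div_add_mod (m ^^^ (2 ^ (j + 1 + 1) - 1)) 2
    omega

theorem natB_reflect (k : Nat) : ∀ m, m < 2 ^ k → natB (m + 2 ^ k) = natB m ^^^ (2 ^ (k + 1) - 1) := by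
  induction k with
  | zero =>
    intro m h
    have : m = 0 := by omega
    subst this
    have h1 : natB 1 = 1 := by rw [natB_eq]; simp [natB_zero]
    norm_num [h1, natB_zero]
  | succ k ih =>
    intro m h
    have hps : 2 ^ (k + 1) = 2 * 2 ^ k := by rw [Nat.pow_succ]; ring
    have hp : (0 : Nat) < 2 ^ k := Nat.two_pow_pos k
    have heq : (m + 2 ^ (k + 1)) / 2 = m / 2 + 2 ^ k := by omega
    rw [natB_eq (m + 2 ^ (k + 1)), heq, ih _ (by omega), natB_eq m]
    rw [xor_shuffle, add_pow_xor (k + 1) m h]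
    conv_rhs => rw [xor_right_comm]

theorem natB_reflect' (k : Nat) (m : Nat) (h : m < 2 ^ k) :
    natB (m + 2 ^ k) = 2 ^ (k + 1) - 1 - natB m := by
  have hb : natB m < 2 ^ k := natB_lt k m h
  have hb1 : natB m < 2 ^ (k + 1) := lt_of_lt_of_le hb (Nat.pow_le_pow_right (by norm_num) (by omega))
  rw [natB_reflect k m h, xor_ones (k + 1) _ hb1]

theorem band_bit (m k : Nat) : m &&& 2 ^ k = (m / 2 ^ k % 2) * 2 ^ k := by
  rw [Nat.and_two_pow]
  congr 1
  rw [Nat.testBit_eq_decide_div_mod_eq]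
  rcases Nat.mod_two_eq_zero_or_one (m / 2 ^ k) with h | h <;> simp [h]

theorem mod_split (m k : Nat) : m % 2 ^ (k + 1) = m % 2 ^ k + 2 ^ k * (m / 2 ^ k % 2) := by
  rw [Nat.pow_succ]; exact Nat.mod_mul

theorem pvALoop_congr (n a : Int) (k : Nat) {m1 m2 : Int} (h : m1 = m2) (h1 : 0 < m1) (h2 : 0 < m2) :
    pvALoop n a k m1 h1 = pvALoop n a k m2 h2 := by subst h; rfl

theorem natCast_two_pow (k : Nat) : (((2 ^ k : Nat) : Int)) = (2 : Int) ^ k := by push_cast; ring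

theorem mask_step (k : Nat) : (((2 ^ k : Nat) : Int)) <<< (1 : Nat) = ((2 ^ (k + 1) : Nat) : Int) := by
  rw [Int.shiftLeft_eq, natCast_two_pow, natCast_two_pow]
  rw [pow_succ]
  norm_num
  ring

theorem two_pow_cast_pos (k : Nat) : (0 : Int) < ((2 ^ k : Nat) : Int) := by positivity

theorem ALoop_inv (j : Nat) : ∀ (k m : Nat) (hp : (0 : Int) < ((2 ^ k : Nat) : Int)),
    m < 2 ^ (k + j) →
    pvALoop (m : Int) ((natB (m % 2 ^ k) : Nat) : Int) k ((2 ^ k : Nat) : Int) hp = ((natB m : Nat) : Int) := by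
  induction j with
  | zero =>
    intro k m hp h
    rw [pvALoop, dif_neg (by exact_mod_cast not_le.mpr h)]
    rw [Nat.mod_eq_of_lt (by simpa using h)]
  | succ j ih =>
    intro k m hp h
    by_cases hc : 2 ^ k ≤ m
    · rw [pvALoop, dif_pos (by exact_mod_cast hc)]
      have hband : PySem.Int.band (m : Int) ((2 ^ k : Nat) : Int) = ((m &&& 2 ^ k : Nat) : Int) := by
        exact PySem.Int.band_natCast m (2 ^ k)
      have hbit := band_bit m k
      have hmod := mod_split m k
      have hmlt : m % 2 ^ k < 2 ^ k := Nat.mod_lt _ (Nat.two_pow_pos k)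
      have hBlt : natB (m % 2 ^ k) < 2 ^ k := natB_lt k _ hmlt
      have hps : 2 ^ (k + 1) = 2 * 2 ^ k := by rw [Nat.pow_succ]; ring
      have hp2 : (0 : Nat) < 2 ^ k := Nat.two_pow_pos k
      have hansb : (if PySem.Int.band (m : Int) ((2 ^ k : Nat) : Int) ≠ 0
            then 2 ^ (k + 1) - 1 - ((natB (m % 2 ^ k) : Nat) : Int)
            else ((natB (m % 2 ^ k) : Nat) : Int))
          = ((natB (m % 2 ^ (k + 1)) : Nat) : Int) := by
        rcases Nat.mod_two_eq_zero_or_one (m / 2 ^ k) with hb | hb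
        · rw [if_neg]
          · rw [hmod, hb]; norm_num
          · rw [hband, hbit, hb]; simp
        · rw [if_pos]
          · have hms : m % 2 ^ (k + 1) = m % 2 ^ k + 2 ^ k := by
              rw [hb, Nat.mul_one] at hmod; exact hmod
            rw [hms, natB_reflect' k _ hmlt]
            rw [Nat.cast_sub (by omega : natB (m % 2 ^ k) ≤ 2 ^ (k + 1) - 1),
              Nat.cast_sub (by omega : 1 ≤ 2 ^ (k + 1))]
            push_cast
            ring
          · rw [hband, hbit, hb]
            simp only [one_mul, ne_eq, Nat.cast_eq_zero]
            positivity
      rw [hansb]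
      have hstep := (pvALoop_congr (m : Int) ((natB (m % 2 ^ (k + 1)) : Nat) : Int) (k + 1)
        (mask_step k) (by rw [mask_step k]; exact two_pow_cast_pos (k + 1)) (two_pow_cast_pos (k + 1)))
      rw [hstep]
      rw [show k + (j + 1) = k + 1 + j by omega] at h
      exact ih (k + 1) m (two_pow_cast_pos (k + 1)) h
    · rw [pvALoop, dif_neg (by exact_mod_cast not_le.mpr (by omega : m < 2 ^ k))]
      rw [Nat.mod_eq_of_lt (by omega)]

theorem BLoop_inv : ∀ (m : Nat) (r : Nat), pvBLoop (m : Int) (r : Int) = ((r ^^^ natB m : Nat) : Int) := by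
  intro m
  induction m using Nat.strong_induction_on with
  | _ m IH =>
    intro r
    by_cases h : m = 0
    · subst h
      rw [pvBLoop, dif_neg (by norm_num)]
      simp [natB_zero]
    · rw [pvBLoop, dif_pos (by exact_mod_cast Nat.pos_of_ne_zero h)]
      have hs : ((m : Int) >>> (1 : Nat)) = ((m / 2 : Nat) : Int) := by
        have h1 : ((m : Int) >>> (1 : Nat)) = ((m >>> 1 : Nat) : Int) :=
          (Int.natCast_shiftRight m 1).symm
        rw [h1]
        norm_num [Nat.shiftRight_eq_div_pow]
      have hx : PySem.Int.bxor (r : Int) (m : Int) = ((r ^^^ m : Nat) : Int) := by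
        exact PySem.Int.bxor_natCast r m
      rw [hs, hx, IH (m / 2) (Nat.div_lt_self (Nat.pos_of_ne_zero h) one_lt_two)]
      rw [Nat.xor_assoc, ← natB_eq]

theorem A_value (m : Nat) : minimumOneBitOperations (m : Int) = ((natB m : Nat) : Int) := by
  unfold minimumOneBitOperations
  have h0 : ((natB (m % 2 ^ 0) : Nat) : Int) = 0 := by
    norm_num [Nat.mod_one, natB_zero]
  have h1 : (1 : Int) = ((2 ^ 0 : Nat) : Int) := by norm_num
  have hlt : m < 2 ^ (0 + (m + 1)) :=
    lt_of_lt_of_le Nat.lt_two_pow_self (Nat.pow_le_pow_right (by norm_num) (by omega))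
  calc pvALoop (m : Int) 0 0 1 (by norm_num)
      = pvALoop (m : Int) ((natB (m % 2 ^ 0) : Nat) : Int) 0 ((2 ^ 0 : Nat) : Int) (two_pow_cast_pos 0) := by
        rw [h0]
        exact pvALoop_congr _ _ _ h1 (by norm_num) (two_pow_cast_pos 0)
    _ = ((natB m : Nat) : Int) := ALoop_inv (m + 1) 0 m (two_pow_cast_pos 0) hlt

theorem B_value (m : Nat) : minimumOneBitOperations_alt (m : Int) = ((natB m : Nat) : Int) := by
  unfold minimumOneBitOperations_alt
  have h0 : (0 : Int) = ((0 : Nat) : Int) := by norm_num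
  rw [h0, BLoop_inv m 0]
  simp

-- ===== VERDICT (by name: the statement is the Claim_ definition above) =====
theorem minimumOneBitOperations_spec : Claim_equal_minimumOneBitOperations := by
  intro n _
  unfold Spec_minimumOneBitOperations
  by_cases hn : 0 < n
  · obtain ⟨m, rfl⟩ : ∃ m : Nat, n = (m : Int) := ⟨n.toNat, (Int.toNat_of_nonneg hn.le).symm⟩
    rw [A_value, B_value]
  · have hA : minimumOneBitOperations n = 0 := by
      unfold minimumOneBitOperations
      rw [pvALoop, dif_neg (by omega)]
    have hB : minimumOneBitOperations_alt n = 0 := by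
      unfold minimumOneBitOperations_alt
      rw [pvBLoop, dif_neg hn]
    rw [hA, hB]
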